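-- pv_equiv track=rewrite | github.com/aliuly/xlpricer | xlpricer/normalize.py | validate_tier
-- ===== SOURCE A (Python) =====
-- def validate_tier(groupID:str, recID:str, region:str):
--   '''Make sure that the groupID and recordID match correctly
--   :param groupID: Group ID to match
--   :param recID: Record ID to match
--   :param region: region check
--   '''
--   if not recID.startswith(groupID) or recID == groupID: return False
--   l = len(groupID)
--   if recID != groupID and recID[l] != '_':  return False
--   for i in range(l+1,len(recID)):
--     if '0' > recID[i] or recID[i] > '9':
--       return recID[i:] == ('-'+region)
--   return True
-- ===== SOURCE B (Python) =====
-- def validate_tier(groupID: str, recID: str, region: str):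
--   '''Make sure that the groupID and recordID match correctly'''
--   prefix = groupID + '_'
--   if not recID.startswith(prefix):
--     return False
--   rest = recID[len(prefix):]
--   suffix = '-' + region
--   if rest.endswith(suffix):
--     rest = rest[:len(rest) - len(suffix)]
--   return all('0' <= c <= '9' for c in rest)
-- ===== Notes on version B (the rewrite author's own statement) =====
-- stated objective: idiomatic
-- what changed: Replaces the manual prefix test, explicit index loop and early return at the first non-digit by one prefix check, an optional suffix strip, and an all-digits test over the remaining slice.
import Mathlib
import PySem

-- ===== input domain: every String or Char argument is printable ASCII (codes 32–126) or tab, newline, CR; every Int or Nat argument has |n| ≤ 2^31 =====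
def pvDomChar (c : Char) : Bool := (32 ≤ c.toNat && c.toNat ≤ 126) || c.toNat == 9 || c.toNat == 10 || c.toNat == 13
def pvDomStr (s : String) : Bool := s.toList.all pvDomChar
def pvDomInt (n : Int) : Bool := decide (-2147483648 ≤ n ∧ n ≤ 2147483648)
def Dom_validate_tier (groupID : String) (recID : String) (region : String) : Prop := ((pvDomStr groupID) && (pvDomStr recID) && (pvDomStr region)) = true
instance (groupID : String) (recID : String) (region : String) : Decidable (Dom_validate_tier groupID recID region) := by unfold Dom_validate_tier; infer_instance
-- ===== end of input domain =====

-- B replaces A's index loop with early returns by a prefix check, an optional suffix strip and an all-digits test (objective: idiomatic).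

-- ===== PORT A =====
-- A's for-loop: scans recID[l+1:]; at the first non-digit returns recID[i:] == '-'+region
def pvALoop (region : String) : List Char → Bool
  | [] => true
  | c :: rest =>
      if '0' > c ∨ c > '9' then decide (c :: rest = '-' :: region.toList)
      else pvALoop region rest

def validate_tier (groupID : String) (recID : String) (region : String) : Bool :=
  if ¬ PySem.Chars.startswith recID.toList groupID.toList ∨ recID = groupID then false
  else
    -- l = len(groupID); recID[l] is in range whenever the guard is reached
    -- (startswith ∧ recID ≠ groupID), so recID.toList[l]? ≠ some '_' is exactly recID[l] != '_'
    if recID ≠ groupID ∧ recID.toList[groupID.toList.length]? ≠ some '_' then false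
    else pvALoop region (recID.toList.drop (groupID.toList.length + 1))

-- ===== PORT B =====
def validate_tier_alt (groupID : String) (recID : String) (region : String) : Bool :=
  -- prefix = groupID + '_'; rest = recID[len(prefix):]; suffix = '-' + region
  if PySem.Chars.startswith recID.toList (groupID.toList ++ ['_']) then
    (if PySem.Chars.endswith (recID.toList.drop (groupID.toList ++ ['_']).length) ('-' :: region.toList) then
        (recID.toList.drop (groupID.toList ++ ['_']).length).take
          ((recID.toList.drop (groupID.toList ++ ['_']).length).length - ('-' :: region.toList).length)
      else recID.toList.drop (groupID.toList ++ ['_']).length).all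
      (fun c => decide ('0' ≤ c) && decide (c ≤ '9'))
  else false

-- ===== PRECONDITION & SPEC =====
def Spec_validate_tier (groupID : String) (recID : String) (region : String) (out : Bool) : Prop := out = validate_tier_alt groupID recID region
instance (groupID : String) (recID : String) (region : String) (out : Bool) : Decidable (Spec_validate_tier groupID recID region out) := by unfold Spec_validate_tier; infer_instance

-- ===== CLAIM (what is proved, stated in full; the proofs are below) =====
def Claim_equal_validate_tier : Prop := ∀ (groupID : String) (recID : String) (region : String), Dom_validate_tier groupID recID region → Spec_validate_tier groupID recID region (validate_tier groupID recID region)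

-- ===== LEMMAS AND PROOFS =====

theorem pvALoop_eq (region : String) (t : List Char) :
    pvALoop region t =
      (if PySem.Chars.endswith t ('-' :: region.toList) then
          t.take (t.length - ('-' :: region.toList).length) else t).all
        (fun c => decide ('0' ≤ c) && decide (c ≤ '9')) := by
  induction t with
  | nil =>
      have h : PySem.Chars.endswith ([] : List Char) ('-' :: region.toList) = false := by
        rw [Bool.eq_false_iff]
        intro h
        have := (PySem.Chars.endswith_iff _ _).mp h
        simp [List.suffix_nil] at this
      simp [pvALoop, h]
  | cons c rest ih =>
      by_cases hd : '0' ≤ c ∧ c ≤ '9'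
      · -- digit character
        have hcne : ('-' :: region.toList) ≠ c :: rest := by
          intro h
          injection h with h1 _
          have h0 := hd.1
          rw [← h1] at h0
          exact (by decide : ¬ ('0' : Char) ≤ '-') h0
        have hend : PySem.Chars.endswith (c :: rest) ('-' :: region.toList)
            = PySem.Chars.endswith rest ('-' :: region.toList) := by
          by_cases hs : ('-' :: region.toList) <:+ rest
          · rw [(PySem.Chars.endswith_iff _ _).mpr (hs.trans (List.suffix_cons c rest)),
              (PySem.Chars.endswith_iff _ _).mpr hs]
          · have h1 : PySem.Chars.endswith rest ('-' :: region.toList) = false := by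
              rw [Bool.eq_false_iff]; intro h; exact hs ((PySem.Chars.endswith_iff _ _).mp h)
            have h2 : PySem.Chars.endswith (c :: rest) ('-' :: region.toList) = false := by
              rw [Bool.eq_false_iff]; intro h
              rcases List.suffix_cons_iff.mp ((PySem.Chars.endswith_iff _ _).mp h) with h | h
              · exact hcne h
              · exact hs h
            rw [h1, h2]
        have hA : pvALoop region (c :: rest) = pvALoop region rest := by
          simp only [pvALoop]
          rw [if_neg]
          simp only [not_or, not_lt]
          exact ⟨hd.1, hd.2⟩
        rw [hA, ih, hend]
        by_cases hs : ('-' :: region.toList) <:+ rest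
        · have hsw : PySem.Chars.endswith rest ('-' :: region.toList) = true :=
            (PySem.Chars.endswith_iff _ _).mpr hs
          have hlen : ('-' :: region.toList).length ≤ rest.length := hs.length_le
          rw [hsw]
          simp only [if_true]
          have hl : (c :: rest).length - ('-' :: region.toList).length
              = (rest.length - ('-' :: region.toList).length) + 1 := by
            simp only [List.length_cons] at hlen ⊢; omega
          rw [hl, List.take_succ_cons, List.all_cons]
          simp [hd.1, hd.2]
        · have hsw : PySem.Chars.endswith rest ('-' :: region.toList) = false := by
            rw [Bool.eq_false_iff]; intro h; exact hs ((PySem.Chars.endswith_iff _ _).mp h)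
          rw [hsw]
          simp [hd.1, hd.2]
      · -- non-digit character: A returns the suffix comparison here
        have hA : pvALoop region (c :: rest) = decide (c :: rest = '-' :: region.toList) := by
          simp only [pvALoop]
          rw [if_pos]
          by_contra h
          simp only [not_or, not_lt] at h
          exact hd ⟨h.1, h.2⟩
        have hdig : (decide ('0' ≤ c) && decide (c ≤ '9')) = false := by
          rcases (not_and_or.mp hd) with h | h <;> simp [h]
        by_cases he : c :: rest = '-' :: region.toList
        · have hend : PySem.Chars.endswith (c :: rest) ('-' :: region.toList) = true :=
            (PySem.Chars.endswith_iff _ _).mpr (he ▸ List.suffix_refl _)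
          rw [hA, hend, decide_eq_true he]
          injection he with hc hrest
          subst hc; subst hrest
          simp
        · rw [hA, decide_eq_false he]
          by_cases hs : ('-' :: region.toList) <:+ (c :: rest)
          · have hend : PySem.Chars.endswith (c :: rest) ('-' :: region.toList) = true :=
              (PySem.Chars.endswith_iff _ _).mpr hs
            have hs' : ('-' :: region.toList) <:+ rest := by
              rcases List.suffix_cons_iff.mp hs with h | h
              · exact absurd h.symm he
              · exact h
            have hlen : ('-' :: region.toList).length ≤ rest.length := hs'.length_le
            rw [hend]
            simp only [if_true]
            have hl : (c :: rest).length - ('-' :: region.toList).length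
                = (rest.length - ('-' :: region.toList).length) + 1 := by
              simp only [List.length_cons] at hlen ⊢; omega
            rw [hl, List.take_succ_cons, List.all_cons, hdig]
            simp
          · have hend : PySem.Chars.endswith (c :: rest) ('-' :: region.toList) = false := by
              rw [Bool.eq_false_iff]; intro h; exact hs ((PySem.Chars.endswith_iff _ _).mp h)
            rw [hend]
            simp [hdig]

theorem validate_tier_eq (groupID recID region : String) :
    validate_tier groupID recID region = validate_tier_alt groupID recID region := by
  unfold validate_tier validate_tier_alt
  by_cases hp : (groupID.toList ++ ['_']) <+: recID.toList
  · -- the good prefix case: recID = groupID + '_' + t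
    obtain ⟨t, ht⟩ := hp
    have hR : recID.toList = groupID.toList ++ '_' :: t := by
      rw [← ht]; simp
    have hne : recID ≠ groupID := by
      intro h
      rw [h] at hR
      have := congrArg List.length hR
      simp at this
    have hsw : PySem.Chars.startswith recID.toList groupID.toList = true :=
      (PySem.Chars.startswith_iff _ _).mpr ⟨'_' :: t, hR.symm⟩
    have hB : PySem.Chars.startswith recID.toList (groupID.toList ++ ['_']) = true :=
      (PySem.Chars.startswith_iff _ _).mpr ⟨t, by rw [hR]; simp⟩
    have hget : recID.toList[groupID.toList.length]? = some '_' := by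
      rw [hR]; simp
    have hdrop : recID.toList.drop (groupID.toList.length + 1) = t := by
      rw [hR, show groupID.toList ++ '_' :: t = (groupID.toList ++ ['_']) ++ t from by simp,
        List.drop_left' (by simp)]
    have hlenp : (groupID.toList ++ ['_']).length = groupID.toList.length + 1 := by simp
    rw [if_neg (by simp [hsw, hne]), if_neg (fun h => h.2 hget), hB, if_pos rfl, hlenp, hdrop,
      pvALoop_eq]
  · -- prefix fails: both sides are false
    have hB : PySem.Chars.startswith recID.toList (groupID.toList ++ ['_']) = false := by
      rw [Bool.eq_false_iff]; intro h; exact hp ((PySem.Chars.startswith_iff _ _).mp h)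
    rw [hB, if_neg (fun h => Bool.false_ne_true h)]
    by_cases hsw : groupID.toList <+: recID.toList
    · by_cases heq : recID = groupID
      · rw [if_pos (Or.inr heq)]
      · rw [if_neg (fun h => h.elim
          (fun hn => hn ((PySem.Chars.startswith_iff _ _).mpr hsw)) heq), if_pos]
        refine ⟨heq, ?_⟩
        intro hget
        obtain ⟨t, ht⟩ := hsw
        apply hp
        rw [← ht] at hget
        rw [List.getElem?_append_right (le_refl _)] at hget
        simp at hget
        match t, hget with
        | c :: t', hget =>
          have hc : c = '_' := by simpa using hget
          exact ⟨t', by rw [← ht, hc]; simp⟩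
    · rw [if_pos (Or.inl (fun h => hsw ((PySem.Chars.startswith_iff _ _).mp h)))]

-- ===== VERDICT (by name: the statement is the Claim_ definition above) =====
theorem validate_tier_spec : Claim_equal_validate_tier := by
  intro groupID recID region _
  exact validate_tier_eq groupID recID region
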